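-- pv_equiv track=rewrite | github.com/MatiasPiedrahita/SimulacroParcial03 | SimulacroParcial3.py | calcula_total_ordenes
-- ===== SOURCE A (Python) =====
-- def calcula_total_ordenes(diccionario_ordenes, criterio_busqueda):
--     total = 0
--     for clave in diccionario_ordenes:
--         for categoria, valor in diccionario_ordenes[clave].items():
--             estado = valor[1]
--             if estado == criterio_busqueda:
--                 total += 1
--     return total
-- ===== SOURCE B (Python) =====
-- def calcula_total_ordenes(diccionario_ordenes, criterio_busqueda):
--     ordenes = list(diccionario_ordenes.values())
--
--     def go(lo, hi):
--         if lo >= hi: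
--             return 0
--         if hi - lo == 1:
--             return [valor[1] for valor in ordenes[lo].values()].count(criterio_busqueda)
--         mid = (lo + hi) // 2
--         return go(lo, mid) + go(mid, hi)
--
--     return go(0, len(ordenes))
-- ===== Notes on version B (the rewrite author's own statement) =====
-- stated objective: alternative
-- what changed: B counts by divide-and-conquer: it recursively splits the list of orders in half, at each singleton leaf tallies that order's matching states with list.count, and sums the two halves, instead of A's iterative double loop with a guarded running accumulator and per-key re-lookup.
import Mathlib
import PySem

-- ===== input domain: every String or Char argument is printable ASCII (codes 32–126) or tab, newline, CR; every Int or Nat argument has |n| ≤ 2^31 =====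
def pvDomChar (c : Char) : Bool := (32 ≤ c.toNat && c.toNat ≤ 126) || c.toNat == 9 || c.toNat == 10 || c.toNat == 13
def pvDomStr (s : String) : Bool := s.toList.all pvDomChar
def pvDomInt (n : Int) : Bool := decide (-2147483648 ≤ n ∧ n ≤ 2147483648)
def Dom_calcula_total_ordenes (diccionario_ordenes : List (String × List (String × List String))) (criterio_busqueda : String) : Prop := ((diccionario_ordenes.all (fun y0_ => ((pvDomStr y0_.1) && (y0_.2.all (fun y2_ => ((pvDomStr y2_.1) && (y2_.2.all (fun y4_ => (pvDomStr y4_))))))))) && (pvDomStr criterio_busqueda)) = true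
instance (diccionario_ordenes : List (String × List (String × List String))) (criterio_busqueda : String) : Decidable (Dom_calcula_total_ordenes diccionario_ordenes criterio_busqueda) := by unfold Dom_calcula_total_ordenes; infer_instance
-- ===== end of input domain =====

-- B replaces A's iterative double loop by a divide-and-conquer recursion over the orders, tallying each leaf with list.count (alternative decomposition; same cost).

-- ===== PORT A =====
def calcula_total_ordenes (diccionario_ordenes : List (String × List (String × List String))) (criterio_busqueda : String) : Int :=
  diccionario_ordenes.foldl (fun total kd =>
    kd.2.foldl (fun t cv =>
      let estado := PySem.List.pyGetD cv.2 1 ""   -- valor[1]; exact under Pre_ (2 ≤ length)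
      if estado == criterio_busqueda then t + 1 else t) total) 0

-- ===== PORT B =====
-- go(lo, hi) of Source B; `ordenes[lo]` is in range whenever hi ≤ ordenes.length, so getD is exact there
def pvGo (crit : String) (ordenes : List (List (String × List String))) (lo hi : Nat) : Int :=
  if lo ≥ hi then 0
  else if hi - lo = 1 then
    (((ordenes.getD lo []).map (fun cv => PySem.List.pyGetD cv.2 1 "")).count crit : Int)
  else pvGo crit ordenes lo ((lo + hi) / 2) + pvGo crit ordenes ((lo + hi) / 2) hi
termination_by hi - lo
decreasing_by all_goals omega

def calcula_total_ordenes_alt (diccionario_ordenes : List (String × List (String × List String))) (criterio_busqueda : String) : Int :=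
  let ordenes := diccionario_ordenes.map Prod.snd
  pvGo criterio_busqueda ordenes 0 ordenes.length

-- ===== PRECONDITION & SPEC =====
-- Pre_ excludes exactly the inputs where some inner value list has fewer than 2 elements: there
-- Python A (valor[1]) raises IndexError (and B raises the same).
def Pre_calcula_total_ordenes (diccionario_ordenes : List (String × List (String × List String))) (criterio_busqueda : String) : Prop :=
  ∀ kd ∈ diccionario_ordenes, ∀ cv ∈ kd.2, 2 ≤ cv.2.length
instance (diccionario_ordenes : List (String × List (String × List String))) (criterio_busqueda : String) : Decidable (Pre_calcula_total_ordenes diccionario_ordenes criterio_busqueda) := by unfold Pre_calcula_total_ordenes; infer_instance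

def pvWitness_calcula_total_ordenes : (List (String × List (String × List String))) × String :=
  ([("o1", [("c1", ["x", "S"]), ("c2", ["y", "T"])]), ("o2", [("c3", ["z", "S"])])], "S")

def Spec_calcula_total_ordenes (diccionario_ordenes : List (String × List (String × List String))) (criterio_busqueda : String) (out : Int) : Prop := out = calcula_total_ordenes_alt diccionario_ordenes criterio_busqueda
instance (diccionario_ordenes : List (String × List (String × List String))) (criterio_busqueda : String) (out : Int) : Decidable (Spec_calcula_total_ordenes diccionario_ordenes criterio_busqueda out) := by unfold Spec_calcula_total_ordenes; infer_instance

-- ===== CLAIM =====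
def Claim_equal_calcula_total_ordenes : Prop := ∀ (diccionario_ordenes : List (String × List (String × List String))) (criterio_busqueda : String), Dom_calcula_total_ordenes diccionario_ordenes criterio_busqueda → Pre_calcula_total_ordenes diccionario_ordenes criterio_busqueda → Spec_calcula_total_ordenes diccionario_ordenes criterio_busqueda (calcula_total_ordenes diccionario_ordenes criterio_busqueda)

-- ===== LEMMAS AND PROOFS =====

-- per-order count of matching states
def pvCnt (crit : String) (d : List (String × List String)) : Int :=
  ((d.map (fun cv => PySem.List.pyGetD cv.2 1 "")).count crit : Int)

-- The inner loop of A adds the per-order count.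
theorem pv_inner (crit : String) (l : List (String × List String)) (t : Int) :
    l.foldl (fun t cv =>
      let estado := PySem.List.pyGetD cv.2 1 ""
      if estado == crit then t + 1 else t) t
    = t + pvCnt crit l := by
  induction l generalizing t with
  | nil => simp [pvCnt]
  | cons c cs ih =>
    simp only [List.foldl_cons, ih, pvCnt, List.map_cons, List.count_cons]
    by_cases h : PySem.List.pyGetD c.2 1 "" == crit
    · simp [h]; ring
    · simp [h]

-- A equals the sum of per-order counts.
theorem pv_outer (crit : String) (dic : List (String × List (String × List String))) (t : Int) :
    dic.foldl (fun total kd =>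
      kd.2.foldl (fun t cv =>
        let estado := PySem.List.pyGetD cv.2 1 ""
        if estado == crit then t + 1 else t) total) t
    = t + ((dic.map Prod.snd).map (pvCnt crit)).sum := by
  induction dic generalizing t with
  | cons d ds ih => rw [List.foldl_cons, pv_inner, ih]; simp; ring
  | nil => simp

-- pvGo sums the per-index counts over [lo, hi)
theorem pv_go_sum (crit : String) (ord : List (List (String × List String))) :
    ∀ n lo hi, hi - lo = n →
      pvGo crit ord lo hi
        = ((List.range' lo (hi - lo)).map (fun i => pvCnt crit (ord.getD i []))).sum := by
  intro n
  induction n using Nat.strong_induction_on with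
  | _ n ih =>
    intro lo hi hn
    rw [pvGo]
    by_cases h0 : lo ≥ hi
    · simp [h0, show hi - lo = 0 by omega]
    · by_cases h1 : hi - lo = 1
      · rw [if_neg h0, if_pos h1, h1]
        simp [List.range', pvCnt]
      · have hmidlo : (lo + hi) / 2 - lo < n := by omega
        have hmidhi : hi - (lo + hi) / 2 < n := by omega
        rw [if_neg h0, if_neg h1,
            ih _ hmidlo lo ((lo + hi) / 2) rfl,
            ih _ hmidhi ((lo + hi) / 2) hi rfl]
        have hsplit : List.range' lo ((lo + hi) / 2 - lo) ++
            List.range' ((lo + hi) / 2) (hi - (lo + hi) / 2) = List.range' lo (hi - lo) := by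
          rw [show hi - lo = ((lo + hi) / 2 - lo) + (hi - (lo + hi) / 2) by omega,
              ← List.range'_append_1,
              show lo + ((lo + hi) / 2 - lo) = (lo + hi) / 2 by omega]
        rw [← hsplit, List.map_append, List.sum_append]

-- the indexed sum over [0, length) is the mapped sum
theorem pv_range_sum (crit : String) (ord : List (List (String × List String))) :
    ∀ m s, s + m = ord.length →
      ((List.range' s m).map (fun i => pvCnt crit (ord.getD i []))).sum
        = ((ord.drop s).map (pvCnt crit)).sum := by
  intro m
  induction m with
  | zero =>
    intro s hs
    have hd : List.drop s ord = [] := List.drop_of_length_le (by omega)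
    simp [hd]
  | succ k ih =>
    intro s hs
    have hslt : s < ord.length := by omega
    rw [List.range'_succ, List.map_cons, List.sum_cons, ih (s + 1) (by omega),
        List.drop_eq_getElem_cons hslt, List.map_cons, List.sum_cons,
        List.getD_eq_getElem ord [] hslt]

-- ===== VERDICT =====
theorem calcula_total_ordenes_spec : Claim_equal_calcula_total_ordenes := by
  intro dic crit _ _
  unfold Spec_calcula_total_ordenes calcula_total_ordenes calcula_total_ordenes_alt
  rw [pv_outer, pv_go_sum crit _ _ 0 _ rfl, pv_range_sum crit _ _ 0 (by simp)]
  simp
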